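-- pv_equiv track=rewrite | github.com/MangoLulu221/Scientific-Effort | Task3_demo/TESTcode/demo/返回函数体名称/extract_context.py | get_hop_functions
-- ===== SOURCE A (Python) =====
-- def get_hop_functions(base_func, relation_map, hop_count):
--     """
--     递归获取指定函数的N跳关系函数（去重、排序）
--     参数：
--         - base_func: 基准函数名
--         - relation_map: 调用关系映射（caller_map/callee_map）
--         - hop_count: 跳数（如1=直接关系，2=间接关系）
--     返回：
--         - 去重并排序后的N跳函数列表
--     """
--     if hop_count == 0 or base_func not in relation_map:
--         return []  # 0跳无意义，或基准函数无关系映射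
--
--     # 1跳：直接关系
--     if hop_count == 1:
--         return sorted(list(set(relation_map[base_func])))  # 去重+排序
--
--     # N跳（N>1）：递归获取前一跳的所有关联函数
--     n_minus_1_hops = get_hop_functions(base_func, relation_map, hop_count - 1)
--     n_hops = set()
--     for func in n_minus_1_hops:
--         if func in relation_map:
--             n_hops.update(relation_map[func])
--
--     # 排除基准函数本身（避免自循环干扰）
--     n_hops.discard(base_func)
--     return sorted(list(n_hops))
-- ===== SOURCE B (Python) =====
-- def get_hop_functions(base_func, relation_map, hop_count):
--     """Iterative level-by-level BFS-style expansion instead of recursion on hop_count."""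
--     if hop_count == 0 or base_func not in relation_map:
--         return []
--     current = set(relation_map[base_func])
--     for _ in range(2, hop_count + 1):
--         nxt = set()
--         for func in current:
--             if func in relation_map:
--                 nxt.update(relation_map[func])
--         nxt.discard(base_func)
--         current = nxt
--     return sorted(current)
-- ===== Notes on version B (the rewrite author's own statement) =====
-- stated objective: alternative
-- what changed: Replaces A's linear recursion on hop_count (each call re-sorting the previous level) with a single iterative level-by-level loop that keeps the current frontier as a set and sorts only once at the end.
import Mathlib
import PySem

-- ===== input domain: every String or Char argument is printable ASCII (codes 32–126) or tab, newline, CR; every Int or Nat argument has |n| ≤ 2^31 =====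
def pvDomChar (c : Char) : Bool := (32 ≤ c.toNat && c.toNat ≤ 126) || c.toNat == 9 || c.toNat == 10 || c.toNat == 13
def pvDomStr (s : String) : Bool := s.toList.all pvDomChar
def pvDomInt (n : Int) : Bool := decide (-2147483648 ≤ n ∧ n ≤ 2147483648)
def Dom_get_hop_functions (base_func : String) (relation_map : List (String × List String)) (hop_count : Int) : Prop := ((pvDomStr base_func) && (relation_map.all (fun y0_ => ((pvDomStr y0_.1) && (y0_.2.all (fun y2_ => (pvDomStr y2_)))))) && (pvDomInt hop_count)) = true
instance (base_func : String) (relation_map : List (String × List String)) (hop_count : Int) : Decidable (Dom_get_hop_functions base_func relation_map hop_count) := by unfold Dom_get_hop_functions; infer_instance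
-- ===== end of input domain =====

-- B re-implements A's linear recursion on hop_count as an iterative level-by-level loop
-- keeping the current frontier as a set and sorting once at the end (objective: alternative).

-- Shared line of both Pythons: 'if func in relation_map: n_hops.update(relation_map[func])'
-- (dict lookup = first match in the association list).
def hopUnionStep (relation_map : List (String × List String)) (acc : List String) (func : String) : List String :=
  match relation_map.lookup func with
  | some vs => PySem.Set.update acc vs
  | none => acc

-- ===== PORT A =====
-- Fuel recursion on hop_count.toNat; exact wherever Python A returns: for hop_count ≥ 0 the
-- fuel equals hop_count, and for hop_count < 0 with base_func not a key both give [].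
-- (hop_count < 0 with base_func a key makes Python A recurse forever; excluded by Pre_.)
def getHopA (base_func : String) (relation_map : List (String × List String)) : Nat → List String
  | 0 => []  -- hop_count == 0
  | n + 1 =>
    match relation_map.lookup base_func with
    | none => []  -- base_func not in relation_map
    | some direct =>
      if n = 0 then
        -- hop_count == 1: sorted(list(set(relation_map[base_func])))
        PySem.List.sorted (PySem.Set.ofList direct) (fun x => x) false
      else
        let n_minus_1_hops := getHopA base_func relation_map n
        let n_hops := n_minus_1_hops.foldl (hopUnionStep relation_map) PySem.Set.empty
        PySem.List.sorted (PySem.Set.discard n_hops base_func) (fun x => x) false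

def get_hop_functions (base_func : String) (relation_map : List (String × List String)) (hop_count : Int) : List String :=
  getHopA base_func relation_map hop_count.toNat

-- ===== PORT B =====
def get_hop_functions_alt (base_func : String) (relation_map : List (String × List String)) (hop_count : Int) : List String :=
  if hop_count = 0 then []
  else
    match relation_map.lookup base_func with
    | none => []
    | some direct =>
      let current := PySem.Set.ofList direct
      let final := (PySem.List.pyRange 2 (hop_count + 1) 1).foldl
        (fun cur _ =>
          let nxt := cur.foldl (hopUnionStep relation_map) PySem.Set.empty
          PySem.Set.discard nxt base_func)
        current
      PySem.List.sorted final (fun x => x) false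

-- ===== PRECONDITION & SPEC =====
-- Pre_ excludes only the inputs where Python A never returns: hop_count < 0 with base_func a
-- key of relation_map sends A into unbounded recursion (RecursionError).
def Pre_get_hop_functions (base_func : String) (relation_map : List (String × List String)) (hop_count : Int) : Prop :=
  0 ≤ hop_count ∨ base_func ∉ relation_map.map Prod.fst
instance (base_func : String) (relation_map : List (String × List String)) (hop_count : Int) : Decidable (Pre_get_hop_functions base_func relation_map hop_count) := by unfold Pre_get_hop_functions; infer_instance

def pvWitness_get_hop_functions : String × (List (String × List String)) × Int :=
  ("f", [("f", ["g", "h"]), ("g", ["h", "f"])], 2)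

def Spec_get_hop_functions (base_func : String) (relation_map : List (String × List String)) (hop_count : Int) (out : List String) : Prop := out = get_hop_functions_alt base_func relation_map hop_count
instance (base_func : String) (relation_map : List (String × List String)) (hop_count : Int) (out : List String) : Decidable (Spec_get_hop_functions base_func relation_map hop_count out) := by unfold Spec_get_hop_functions; infer_instance

-- ===== CLAIM (what is proved, stated in full; the proofs are below) =====
def Claim_equal_get_hop_functions : Prop := ∀ (base_func : String) (relation_map : List (String × List String)) (hop_count : Int), Dom_get_hop_functions base_func relation_map hop_count → Pre_get_hop_functions base_func relation_map hop_count → Spec_get_hop_functions base_func relation_map hop_count (get_hop_functions base_func relation_map hop_count)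

-- ===== LEMMAS AND PROOFS =====

-- one B-loop iteration: union of all relations of the frontier, minus the base function
def stepFun (base_func : String) (relation_map : List (String × List String)) (cur : List String) : List String :=
  PySem.Set.discard (cur.foldl (hopUnionStep relation_map) PySem.Set.empty) base_func

lemma mem_foldl_hopUnionStep (rm : List (String × List String)) (l acc : List String) (x : String) :
    x ∈ l.foldl (hopUnionStep rm) acc ↔
      x ∈ acc ∨ ∃ f ∈ l, ∃ vs, rm.lookup f = some vs ∧ x ∈ vs := by
  induction l generalizing acc with
  | nil => simp
  | cons f t ih =>
    simp only [List.foldl_cons, ih, hopUnionStep]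
    cases h : rm.lookup f with
    | none =>
      constructor
      · rintro (hx | ⟨g, hg, ws, hws, hx⟩)
        · exact Or.inl hx
        · exact Or.inr ⟨g, List.mem_cons_of_mem _ hg, ws, hws, hx⟩
      · rintro (hx | ⟨g, hg, ws, hws, hx⟩)
        · exact Or.inl hx
        · rcases List.mem_cons.mp hg with rfl | hg'
          · rw [h] at hws; cases hws
          · exact Or.inr ⟨g, hg', ws, hws, hx⟩
    | some vs =>
      rw [PySem.Set.mem_update]
      constructor
      · rintro ((hx | hx) | ⟨g, hg, ws, hws, hx⟩)
        · exact Or.inl hx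
        · exact Or.inr ⟨f, by simp, vs, h, hx⟩
        · exact Or.inr ⟨g, List.mem_cons_of_mem _ hg, ws, hws, hx⟩
      · rintro (hx | ⟨g, hg, ws, hws, hx⟩)
        · exact Or.inl (Or.inl hx)
        · rcases List.mem_cons.mp hg with rfl | hg'
          · rw [h] at hws; cases hws; exact Or.inl (Or.inr hx)
          · exact Or.inr ⟨g, hg', ws, hws, hx⟩

lemma nodup_foldl_hopUnionStep (rm : List (String × List String)) (l acc : List String)
    (h : acc.Nodup) : (l.foldl (hopUnionStep rm) acc).Nodup := by
  induction l generalizing acc with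
  | nil => exact h
  | cons f t ih =>
    simp only [List.foldl_cons]
    apply ih
    unfold hopUnionStep
    cases rm.lookup f with
    | none => exact h
    | some vs => exact PySem.Set.nodup_update _ _ h

lemma nodup_stepFun (b : String) (rm : List (String × List String)) (cur : List String) :
    (stepFun b rm cur).Nodup :=
  PySem.Set.nodup_discard _ _ (nodup_foldl_hopUnionStep rm cur _ List.nodup_nil)

lemma mem_stepFun (b : String) (rm : List (String × List String)) (cur : List String) (x : String) :
    x ∈ stepFun b rm cur ↔ (∃ f ∈ cur, ∃ vs, rm.lookup f = some vs ∧ x ∈ vs) ∧ x ≠ b := by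
  unfold stepFun
  rw [PySem.Set.mem_discard, mem_foldl_hopUnionStep]
  simp [PySem.Set.empty]

-- stepFun only depends on the membership of its input
lemma stepFun_congr_mem (b : String) (rm : List (String × List String)) (c d : List String)
    (h : ∀ x, x ∈ c ↔ x ∈ d) : ∀ x, x ∈ stepFun b rm c ↔ x ∈ stepFun b rm d := by
  intro x
  rw [mem_stepFun, mem_stepFun]
  constructor
  · rintro ⟨⟨f, hf, vs, hvs, hx⟩, hb⟩; exact ⟨⟨f, (h f).mp hf, vs, hvs, hx⟩, hb⟩
  · rintro ⟨⟨f, hf, vs, hvs, hx⟩, hb⟩; exact ⟨⟨f, (h f).mpr hf, vs, hvs, hx⟩, hb⟩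

lemma foldl_const_iterate {α β : Type} (g : α → α) (l : List β) (a : α) :
    l.foldl (fun x _ => g x) a = g^[l.length] a := by
  induction l generalizing a with
  | nil => rfl
  | cons y t ih => simpa [Function.iterate_succ_apply] using ih (g a)

-- core: A at fuel n+1 is the sorted n-fold iterate of stepFun on set(relation_map[base])
lemma getHopA_eq_iterate (b : String) (rm : List (String × List String)) (direct : List String)
    (hd : rm.lookup b = some direct) (n : Nat) :
    getHopA b rm (n + 1) =
      PySem.List.sorted ((stepFun b rm)^[n] (PySem.Set.ofList direct)) (fun x => x) false := by
  induction n with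
  | zero =>
    rw [Function.iterate_zero, id_eq]
    unfold getHopA
    rw [hd]
    simp
  | succ n ih =>
    have hstep : getHopA b rm (n + 1 + 1) =
        PySem.List.sorted (stepFun b rm (getHopA b rm (n + 1))) (fun x => x) false := by
      conv_lhs => rw [getHopA]
      rw [hd]
      simp [stepFun]
    rw [hstep, ih, Function.iterate_succ_apply']
    rw [PySem.List.sorted_id_eq_sorted_id_iff_perm]
    apply (List.perm_ext_iff_of_nodup (nodup_stepFun _ _ _) (nodup_stepFun _ _ _)).mpr
    apply stepFun_congr_mem
    intro x
    exact PySem.List.mem_sorted _ _ _ x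

lemma lookup_some_mem {k : String} {rm : List (String × List String)} {v : List String}
    (h : rm.lookup k = some v) : k ∈ rm.map Prod.fst := by
  induction rm with
  | nil => simp at h
  | cons p t ih =>
    rcases p with ⟨a, v⟩
    simp only [List.lookup] at h
    by_cases hk : k = a
    · simp [hk]
    · rw [beq_eq_false_iff_ne.mpr hk] at h
      exact List.mem_cons_of_mem _ (ih h)

-- ===== VERDICT (by name: the statement is the Claim_ definition above) =====
theorem get_hop_functions_spec : Claim_equal_get_hop_functions := by
  intro b rm hop _ hpre
  unfold Spec_get_hop_functions get_hop_functions get_hop_functions_alt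
  cases hlk : rm.lookup b with
  | none =>
    cases h : hop.toNat <;> simp [getHopA, hlk]
  | some direct =>
    have hge : 0 ≤ hop := by
      rcases hpre with h | h
      · exact h
      · exact absurd (lookup_some_mem hlk) h
    by_cases h0 : hop = 0
    · subst h0; simp [getHopA]
    · have hpos : 0 < hop := lt_of_le_of_ne hge (Ne.symm h0)
      obtain ⟨m, hm⟩ : ∃ m : Nat, hop = (m : Int) + 1 := by
        refine ⟨(hop - 1).toNat, ?_⟩
        omega
      have htn : hop.toNat = m + 1 := by omega
      rw [htn, getHopA_eq_iterate b rm direct hlk m]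
      simp only [h0, if_false]
      have hlen : (PySem.List.pyRange 2 (hop + 1) 1).length = m := by
        rw [PySem.List.length_pyRange_one]; omega
      have := foldl_const_iterate (stepFun b rm) (PySem.List.pyRange 2 (hop + 1) 1)
        (PySem.Set.ofList direct)
      simp only [stepFun] at this
      rw [this, hlen]
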